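-- pv_equiv track=rewrite | github.com/lxcxjxhx/HOS-ALL | HOS_MANAGER_RE_V1.1/src/config/encryption.py | _match_pattern
-- ===== SOURCE A (Python) =====
-- def _match_pattern(field_path: str, pattern: str) -> bool:
--     """匹配字段路径和模式"""
--     # 简单的通配符匹配
--     pattern_parts = pattern.split('.')
--     path_parts = field_path.split('.')
--
--     # 如果模式长度不同，检查是否有通配符
--     if len(pattern_parts) != len(path_parts):
--         # 检查是否有完全匹配的情况
--         if pattern == field_path:
--             return True
--         return False
--
--     for pattern_part, path_part in zip(pattern_parts, path_parts):
--         if pattern_part != '*' and pattern_part != path_part: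
--             return False
--
--     return True
-- ===== SOURCE B (Python) =====
-- def _match_pattern(field_path: str, pattern: str) -> bool:
--     """Segment-wise wildcard match by a single left-to-right two-pointer scan
--     over the characters (no splitting into segment lists, no zip)."""
--     n, m = len(field_path), len(pattern)
--     i = j = 0
--     while True:
--         # at the start of a segment in both strings
--         if j < m and pattern[j] == '*' and (j + 1 == m or pattern[j + 1] == '.'):
--             jr = j + 1  # pattern position just after the '*'
--             # wildcard segment: skip path characters up to the next '.' or end
--             while i < n and field_path[i] != '.':
--                 i += 1
--             if i == n and jr == m:
--                 return True
--             if i < n and jr < m: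
--                 i, j = i + 1, jr + 1
--                 continue
--             return False
--         # literal comparison inside a segment, until both hit a boundary together
--         while True:
--             pb = i == n or field_path[i] == '.'
--             qb = j == m or pattern[j] == '.'
--             if pb and qb:
--                 if i == n and j == m:
--                     return True
--                 if i < n and j < m:
--                     i, j = i + 1, j + 1
--                     break
--                 return False
--             if pb or qb:
--                 return False
--             if field_path[i] != pattern[j]:
--                 return False
--             i += 1
--             j += 1
-- ===== Notes on version B (the rewrite author's own statement) =====
-- stated objective: alternative
-- what changed: Replaces split-into-segment-lists plus length-check-and-zip-loop by a single character-level two-pointer scan (segment-start / wildcard-skip / literal-compare states) that never materialises the segment lists.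
import Mathlib
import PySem

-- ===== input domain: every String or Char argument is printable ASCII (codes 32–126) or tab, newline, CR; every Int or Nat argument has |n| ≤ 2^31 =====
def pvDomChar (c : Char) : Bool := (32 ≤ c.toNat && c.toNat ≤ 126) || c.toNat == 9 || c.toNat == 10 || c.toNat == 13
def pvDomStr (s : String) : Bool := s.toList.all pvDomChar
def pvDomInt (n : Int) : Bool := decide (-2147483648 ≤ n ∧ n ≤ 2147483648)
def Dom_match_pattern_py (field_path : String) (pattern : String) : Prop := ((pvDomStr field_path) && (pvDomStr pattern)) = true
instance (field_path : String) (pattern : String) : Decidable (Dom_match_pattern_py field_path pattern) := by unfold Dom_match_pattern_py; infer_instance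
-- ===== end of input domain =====

-- B replaces A's split-into-segment-lists + length-check + zip loop by a direct
-- character-level two-pointer scan (alternative decomposition, same cost).

-- ===== PORT A =====
-- the for-loop over zip(pattern_parts, path_parts) with early return False
def pvLoopA : List (List Char × List Char) → Bool
  | [] => true
  | (q, p) :: rest => if q ≠ ['*'] ∧ q ≠ p then false else pvLoopA rest

def match_pattern_py (field_path : String) (pattern : String) : Bool :=
  let pattern_parts := PySem.Chars.splitOn pattern.toList ['.']
  let path_parts := PySem.Chars.splitOn field_path.toList ['.']
  if pattern_parts.length ≠ path_parts.length then
    if pattern == field_path then true else false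
  else
    pvLoopA (pattern_parts.zip path_parts)

-- ===== PORT B =====
mutual
def pvM (path pat : List Char) : Bool :=
  if pat.head? = some '*' ∧ (pat.length = 1 ∨ pat.tail.head? = some '.') then
    pvSkip path pat.tail
  else pvLit path pat
termination_by (path.length + pat.length, 1)
decreasing_by
  · rename_i h
    apply Prod.Lex.left
    cases pat with
    | nil => exact absurd h.1 (by simp)
    | cons a t => simp only [List.length_cons, List.length_tail]; omega
  · apply Prod.Lex.right <;> omega

def pvSkip (path patrest : List Char) : Bool :=
  match path with
  | c :: rest =>
      if c ≠ '.' then pvSkip rest patrest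
      else if patrest ≠ [] then pvM rest patrest.tail
      else false
  | [] => if patrest = [] then true else false
termination_by (path.length + patrest.length, 0)
decreasing_by
  · apply Prod.Lex.left; simp only [List.length_cons]; omega
  · rename_i h1 h2
    apply Prod.Lex.left
    cases patrest with
    | nil => exact absurd rfl h2
    | cons a t => simp only [List.length_cons, List.length_tail]; omega

def pvLit (path pat : List Char) : Bool :=
  if (path = [] ∨ path.head? = some '.') ∧ (pat = [] ∨ pat.head? = some '.') then
    if path = [] ∧ pat = [] then true
    else if path ≠ [] ∧ pat ≠ [] then pvM path.tail pat.tail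
    else false
  else if (path = [] ∨ path.head? = some '.') ∨ (pat = [] ∨ pat.head? = some '.') then
    false
  else
    (path.head? == pat.head?) && pvLit path.tail pat.tail
termination_by (path.length + pat.length, 0)
decreasing_by
  · rename_i h1 h2 h3
    apply Prod.Lex.left
    obtain ⟨hp, hq⟩ := h3
    cases path with
    | nil => exact absurd rfl hp
    | cons a t =>
      cases pat with
      | nil => exact absurd rfl hq
      | cons b u => simp only [List.length_cons, List.length_tail]; omega
  · rename_i h1 h2
    apply Prod.Lex.left
    cases path with
    | nil => simp at h2
    | cons a t =>
      cases pat with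
      | nil => simp at h2
      | cons b u => simp only [List.length_cons, List.length_tail]; omega
end

def match_pattern_py_alt (field_path : String) (pattern : String) : Bool :=
  pvM field_path.toList pattern.toList

-- ===== PRECONDITION & SPEC =====
def Spec_match_pattern_py (field_path : String) (pattern : String) (out : Bool) : Prop := out = match_pattern_py_alt field_path pattern
instance (field_path : String) (pattern : String) (out : Bool) : Decidable (Spec_match_pattern_py field_path pattern out) := by unfold Spec_match_pattern_py; infer_instance

-- ===== CLAIM (what is proved, stated in full; the proofs are below) =====
def Claim_equal_match_pattern_py : Prop := ∀ (field_path : String) (pattern : String), Dom_match_pattern_py field_path pattern → Spec_match_pattern_py field_path pattern (match_pattern_py field_path pattern)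

-- ===== LEMMAS AND PROOFS =====

-- the natural accumulator-free characterisation of splitting on '.'
def pvSpec : List Char → List Char → List (List Char)
  | [], cur => [cur.reverse]
  | c :: t, cur => if c = '.' then cur.reverse :: pvSpec t [] else pvSpec t (c :: cur)

-- first segment / remainder (starts with '.' or empty)
def pvSeg (l : List Char) : List Char := l.takeWhile (· ≠ '.')
def pvSegEnd (l : List Char) : List Char := l.dropWhile (· ≠ '.')

-- tail segments after the first, as produced by pvSpec
def pvRest (l : List Char) : List (List Char) :=
  match pvSegEnd l with | [] => [] | _ :: t => pvSpec t []

-- segment-list matcher equivalent to A's length check + zip loop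
def pvAMatch : List (List Char) → List (List Char) → Bool
  | [], [] => true
  | q :: qs, p :: ps => (q == ['*'] || q == p) && pvAMatch qs ps
  | _, _ => false

-- "rest of the match after the first segments", as seen by pvAMatch
def pvTail (p qr : List Char) : Bool :=
  match pvSegEnd p, qr with
  | [], [] => true
  | _ :: tp, _ :: tq => pvAMatch (pvSpec tq []) (pvSpec tp [])
  | _, _ => false

theorem splitOn_go_eq : ∀ (fuel : Nat) (l cur : List Char) (acc : List (List Char)),
    l.length ≤ fuel →
    PySem.Chars.splitOn.go ['.'] fuel l cur acc = acc.reverse ++ pvSpec l cur := by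
  intro fuel
  induction fuel with
  | zero =>
    intro l cur acc h
    have : l = [] := List.length_eq_zero_iff.mp (Nat.le_zero.mp h)
    subst this
    simp [PySem.Chars.splitOn.go, pvSpec]
  | succ n ih =>
    intro l cur acc h
    cases l with
    | nil => simp [PySem.Chars.splitOn.go, pvSpec]
    | cons c rest =>
      simp only [PySem.Chars.splitOn.go, List.isPrefixOf, List.length]
      by_cases hc : c = '.'
      · subst hc
        simp only [pvSpec]
        rw [if_pos (by simp), ih _ _ _ (by simp only [List.length_drop, List.length_cons] at h ⊢; omega)]
        simp
      · rw [if_neg (by simp only [List.isPrefixOf, Bool.and_eq_true, beq_iff_eq, List.isPrefixOf_nil_left, and_true]; exact fun hh => hc hh.symm)]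
        rw [ih _ _ _ (by simp only [List.length_cons] at h; omega)]
        simp [pvSpec, hc]

theorem pv_splitOn_eq (l : List Char) :
    PySem.Chars.splitOn l ['.'] = pvSpec l [] := by
  unfold PySem.Chars.splitOn
  rw [splitOn_go_eq _ _ _ _ (by omega)]
  simp

theorem pv_loopA_zip (qs : List (List Char)) : ∀ ps, qs.length = ps.length →
    pvLoopA (qs.zip ps) = pvAMatch qs ps := by
  induction qs with
  | nil => intro ps h; cases ps with
    | nil => simp [pvLoopA, pvAMatch]
    | cons p ps => simp at h
  | cons q qs ih =>
    intro ps h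
    cases ps with
    | nil => simp at h
    | cons p ps =>
      simp only [List.zip_cons_cons, pvLoopA, pvAMatch]
      by_cases h1 : q ≠ ['*'] ∧ q ≠ p
      · rw [if_pos h1]
        have : (q == ['*']) = false := by simp [h1.1]
        have h2 : (q == p) = false := by simp [h1.2]
        simp [this, h2]
      · rw [if_neg h1]
        push_neg at h1
        have : (q == ['*'] || q == p) = true := by
          by_cases hq : q = ['*']
          · simp [hq]
          · simp [h1 hq]
        rw [this, Bool.true_and]
        exact ih ps (by simpa using h)

theorem pv_aMatch_ne_length (qs : List (List Char)) : ∀ ps, qs.length ≠ ps.length →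
    pvAMatch qs ps = false := by
  induction qs with
  | nil => intro ps h; cases ps with
    | nil => simp at h
    | cons p ps => simp [pvAMatch]
  | cons q qs ih =>
    intro ps h
    cases ps with
    | nil => simp [pvAMatch]
    | cons p ps =>
      simp only [pvAMatch]
      rw [ih ps (by simpa using h)]
      simp

theorem pvSpec_decomp : ∀ (l cur : List Char),
    pvSpec l cur = (cur.reverse ++ pvSeg l) :: pvRest l := by
  intro l
  induction l with
  | nil => intro cur; simp [pvSpec, pvSeg, pvSegEnd, pvRest]
  | cons c t ih =>
    intro cur
    by_cases hc : c = '.'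
    · subst hc
      simp [pvSpec, pvSeg, pvSegEnd, pvRest, List.takeWhile, List.dropWhile]
    · simp only [pvSpec, if_neg hc]
      rw [ih (c :: cur)]
      simp [pvSeg, pvSegEnd, pvRest, List.takeWhile, List.dropWhile, hc]

theorem pv_aDecomp (p q : List Char) :
    pvAMatch (pvSpec q []) (pvSpec p []) =
      ((pvSeg q == ['*'] || pvSeg q == pvSeg p) && pvTail p (pvSegEnd q)) := by
  rw [pvSpec_decomp q, pvSpec_decomp p]
  simp only [List.reverse_nil, List.nil_append, pvAMatch]
  congr 1
  unfold pvRest pvTail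
  cases hp : pvSegEnd p with
  | nil => cases hq : pvSegEnd q with
    | nil => simp [pvAMatch]
    | cons b tq => simp [pvSpec_decomp tq [], pvAMatch]
  | cons a tp => cases hq : pvSegEnd q with
    | nil => simp [pvSpec_decomp tp [], pvAMatch]
    | cons b tq => rfl

-- pvTail ignores a leading non-dot character of the path
theorem pvTail_cons {c : Char} (hc : c ≠ '.') (tp x : List Char) :
    pvTail (c :: tp) x = pvTail tp x := by
  unfold pvTail
  have h : pvSegEnd (c :: tp) = pvSegEnd tp := by simp [pvSegEnd, List.dropWhile_cons, hc]
  rw [h]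

-- the main mutual invariant, by strong induction on the total length
theorem pv_main : ∀ (n : Nat) (p q : List Char), p.length + q.length ≤ n →
    (pvSkip p q = pvTail p q)
    ∧ (pvLit p q = ((pvSeg q == pvSeg p) && pvTail p (pvSegEnd q)))
    ∧ (pvM p q = pvAMatch (pvSpec q []) (pvSpec p [])) := by
  intro n
  induction n with
  | zero =>
    intro p q h
    have hp : p = [] := List.length_eq_zero_iff.mp (by omega)
    have hq : q = [] := List.length_eq_zero_iff.mp (by omega)
    subst hp; subst hq
    refine ⟨?_, ?_, ?_⟩ <;>
      simp [pvSkip, pvLit, pvM, pvTail, pvSegEnd, pvSeg, pvSpec, pvAMatch]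
  | succ n ih =>
    intro p q hle
    have hS : pvSkip p q = pvTail p q := by
      cases p with
      | nil =>
        cases q with
        | nil => simp [pvSkip, pvTail, pvSegEnd]
        | cons d tq => simp [pvSkip, pvTail, pvSegEnd]
      | cons c rest =>
        by_cases hc : c = '.'
        · subst hc
          cases q with
          | nil => simp [pvSkip, pvTail, pvSegEnd, List.dropWhile_cons]
          | cons d tq =>
            have hM' := (ih rest tq (by simp only [List.length_cons] at hle; omega)).2.2
            simp [pvSkip, pvTail, pvSegEnd, List.dropWhile_cons, hM']
        · have hS' := (ih rest q (by simp only [List.length_cons] at hle; omega)).1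
          rw [pvTail_cons hc]
          simp [pvSkip, hc, hS']
    have hL : pvLit p q = ((pvSeg q == pvSeg p) && pvTail p (pvSegEnd q)) := by
      by_cases hpb : p = [] ∨ p.head? = some '.'
      · by_cases hqb : q = [] ∨ q.head? = some '.'
        · -- both at a boundary
          have heq : pvSegEnd q = q := by
            rcases hqb with rfl | h
            · simp [pvSegEnd]
            · cases q with
              | nil => simp [pvSegEnd]
              | cons b tq =>
                have : b = '.' := by simpa using h
                subst this; simp [pvSegEnd, List.dropWhile_cons]
          rw [heq]
          cases p with
          | nil =>
            cases q with
            | nil => simp [pvLit, pvTail, pvSegEnd, pvSeg]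
            | cons b tq =>
              have : b = '.' := by simpa using hqb.resolve_left (by simp)
              subst this
              rw [pvLit.eq_def]
              simp [pvTail, pvSegEnd, pvSeg, List.takeWhile_cons]
          | cons a tp =>
            have ha : a = '.' := by simpa using hpb.resolve_left (by simp)
            subst ha
            cases q with
            | nil =>
              rw [pvLit.eq_def]
              simp [pvTail, pvSegEnd, pvSeg, List.takeWhile_cons, List.dropWhile_cons]
            | cons b tq =>
              have hb : b = '.' := by simpa using hqb.resolve_left (by simp)
              subst hb
              have hM' := (ih tp tq (by simp only [List.length_cons] at hle; omega)).2.2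
              rw [pvLit.eq_def]
              simp [pvTail, pvSegEnd, pvSeg, List.takeWhile_cons, List.dropWhile_cons, hM']
        · -- p at a boundary, q not
          obtain ⟨b, tq, rfl, hb⟩ : ∃ b tq, q = b :: tq ∧ b ≠ '.' := by
            cases q with
            | nil => exact absurd (Or.inl rfl) hqb
            | cons b tq => exact ⟨b, tq, rfl, fun h => hqb (Or.inr (by simp [h]))⟩
          have hsq : pvSeg (b :: tq) = b :: pvSeg tq := by simp [pvSeg, List.takeWhile_cons, hb]
          have hsp : pvSeg p = [] := by
            rcases hpb with rfl | h
            · simp [pvSeg]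
            · cases p with
              | nil => simp [pvSeg]
              | cons a tp =>
                have : a = '.' := by simpa using h
                subst this; simp [pvSeg, List.takeWhile_cons]
          rw [hsq, hsp]
          have hfalse : ¬((p = [] ∨ p.head? = some '.') ∧ ((b :: tq) = [] ∨ (b :: tq).head? = some '.')) := by
            intro hcon; exact hqb hcon.2
          rw [pvLit.eq_def]
          rw [if_neg hfalse, if_pos (Or.inl hpb)]
          simp
      · -- p not at a boundary
        obtain ⟨a, tp, rfl, ha⟩ : ∃ a tp, p = a :: tp ∧ a ≠ '.' := by
          cases p with
          | nil => exact absurd (Or.inl rfl) hpb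
          | cons a tp => exact ⟨a, tp, rfl, fun h => hpb (Or.inr (by simp [h]))⟩
        have hsp : pvSeg (a :: tp) = a :: pvSeg tp := by simp [pvSeg, List.takeWhile_cons, ha]
        by_cases hqb : q = [] ∨ q.head? = some '.'
        · -- q at a boundary, p not
          have hsq : pvSeg q = [] := by
            rcases hqb with rfl | h
            · simp [pvSeg]
            · cases q with
              | nil => simp [pvSeg]
              | cons b tq =>
                have : b = '.' := by simpa using h
                subst this; simp [pvSeg, List.takeWhile_cons]
          rw [hsq, hsp]
          have hfalse : ¬(((a :: tp) = [] ∨ (a :: tp).head? = some '.') ∧ (q = [] ∨ q.head? = some '.')) := by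
            intro hcon; exact hpb hcon.1
          rw [pvLit.eq_def]
          rw [if_neg hfalse, if_pos (Or.inr hqb)]
          simp
        · -- neither at a boundary
          obtain ⟨b, tq, rfl, hb⟩ : ∃ b tq, q = b :: tq ∧ b ≠ '.' := by
            cases q with
            | nil => exact absurd (Or.inl rfl) hqb
            | cons b tq => exact ⟨b, tq, rfl, fun h => hqb (Or.inr (by simp [h]))⟩
          have hsq : pvSeg (b :: tq) = b :: pvSeg tq := by simp [pvSeg, List.takeWhile_cons, hb]
          have heq : pvSegEnd (b :: tq) = pvSegEnd tq := by simp [pvSegEnd, List.dropWhile_cons, hb]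
          have hL' := (ih tp tq (by simp only [List.length_cons] at hle; omega)).2.1
          have hfalse : ¬(((a :: tp) = [] ∨ (a :: tp).head? = some '.') ∧ ((b :: tq) = [] ∨ (b :: tq).head? = some '.')) := by
            intro hcon; exact hpb hcon.1
          have hfalse2 : ¬(((a :: tp) = [] ∨ (a :: tp).head? = some '.') ∨ ((b :: tq) = [] ∨ (b :: tq).head? = some '.')) := by
            intro hcon; rcases hcon with h | h
            · exact hpb h
            · exact hqb h
          rw [pvLit.eq_def]
          rw [if_neg hfalse, if_neg hfalse2, List.tail_cons, List.tail_cons, hL', hsq, hsp, heq, pvTail_cons ha]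
          simp only [List.head?_cons]
          by_cases hab : a = b
          · subst hab; simp [Bool.and_assoc]
          · have h1 : (some a == some b) = false := by simp [hab]
            have h2 : (b :: pvSeg tq == a :: pvSeg tp) = false := by
              simp [List.cons_beq_cons, Ne.symm hab]
            rw [h1, h2]
            simp
    have hM : pvM p q = pvAMatch (pvSpec q []) (pvSpec p []) := by
      rw [pv_aDecomp]
      by_cases hw : q.head? = some '*' ∧ (q.length = 1 ∨ q.tail.head? = some '.')
      · obtain ⟨hwh, hwt⟩ := hw
        cases q with
        | nil => simp at hwh
        | cons b tq =>
          have hb : b = '*' := by simpa using hwh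
          subst hb
          have htq : tq = [] ∨ tq.head? = some '.' := by
            rcases hwt with h1 | h2
            · left; simpa using h1
            · right; simpa using h2
          have hseg : pvSeg ('*' :: tq) = ['*'] := by
            rcases htq with rfl | h
            · simp [pvSeg, List.takeWhile_cons]
            · cases tq with
              | nil => simp [pvSeg, List.takeWhile_cons]
              | cons d tq' =>
                have : d = '.' := by simpa using h
                subst this; simp [pvSeg, List.takeWhile_cons]
          have hend : pvSegEnd ('*' :: tq) = tq := by
            rcases htq with rfl | h
            · simp [pvSegEnd, List.dropWhile_cons]
            · cases tq with
              | nil => simp [pvSegEnd, List.dropWhile_cons]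
              | cons d tq' =>
                have : d = '.' := by simpa using h
                subst this; simp [pvSegEnd, List.dropWhile_cons]
          have hSkip := (ih p tq (by simp only [List.length_cons] at hle; omega)).1
          rw [pvM.eq_def]
          rw [if_pos ⟨hwh, hwt⟩]
          simp only [List.tail_cons]
          rw [hSkip, hseg, hend]
          simp
      · have hns : (pvSeg q == ['*']) = false := by
          apply beq_eq_false_iff_ne.mpr
          intro hEq
          apply hw
          cases q with
          | nil => simp [pvSeg] at hEq
          | cons b tq =>
            by_cases hbd : b = '.'
            · subst hbd; simp [pvSeg, List.takeWhile_cons] at hEq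
            · have hEq' : b :: tq.takeWhile (· ≠ '.') = ['*'] := by
                simpa [pvSeg, List.takeWhile_cons, hbd] using hEq
              have hbstar : b = '*' := (List.cons.injEq _ _ _ _ ▸ hEq').1
              have htw : tq.takeWhile (· ≠ '.') = [] := (List.cons.injEq _ _ _ _ ▸ hEq').2
              subst hbstar
              refine ⟨by simp, ?_⟩
              cases tq with
              | nil => left; simp
              | cons d tq' =>
                right
                have : d = '.' := by
                  by_contra hd
                  simp [List.takeWhile_cons, hd] at htw
                subst this; simp
        rw [pvM.eq_def]
        rw [if_neg hw, hL, hns]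
        simp
    exact ⟨hS, hL, hM⟩

-- ===== VERDICT (by name: the statement is the Claim_ definition above) =====
theorem match_pattern_py_spec : Claim_equal_match_pattern_py := by
  intro fp pat _
  unfold Spec_match_pattern_py match_pattern_py match_pattern_py_alt
  rw [pv_splitOn_eq, pv_splitOn_eq]
  have hM := (pv_main (fp.toList.length + pat.toList.length) fp.toList pat.toList le_rfl).2.2
  rw [hM]
  by_cases hlen : (pvSpec pat.toList []).length = (pvSpec fp.toList []).length
  · simp only [hlen, ne_eq, not_true_eq_false, if_false]
    exact pv_loopA_zip _ _ hlen
  · rw [if_pos hlen]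
    have hne : (pat == fp) = false := by
      apply beq_eq_false_iff_ne.mpr
      intro hEq; subst hEq; exact hlen rfl
    rw [hne]
    simp only [Bool.false_eq_true, if_false]
    exact (pv_aMatch_ne_length _ _ hlen).symm
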